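-- pv_equiv track=rewrite | github.com/alex-1263/cs | 杂物/4.py | count_equation_solutions
-- ===== SOURCE A (Python) =====
-- def count_equation_solutions(a, b, c):
--     # 计算数位和范围
--     min_digit_sum = a
--     max_digit_sum = 9 * len(str(10**12))  # 10^12 最多有 13 位，每位都是 9
--
--     count = 0
--
--     for digit_sum_z in range(min_digit_sum, max_digit_sum + 1):
--         if (2 - c) % b == 0 and (2 - c) // b == digit_sum_z:
--             count += 1
--
--     return count
-- ===== SOURCE B (Python) =====
-- def count_equation_solutions(a, b, c):
--     # Single arithmetic test instead of scanning the constant range.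
--     max_digit_sum = 9 * len(str(10**12))  # 117
--     if a > max_digit_sum:
--         return 0
--     q, r = divmod(2 - c, b)
--     return 1 if r == 0 and a <= q <= max_digit_sum else 0
-- ===== Notes on version B (the rewrite author's own statement) =====
-- stated objective: simpler
-- what changed: Replaces the scan over the constant range [a,117] with a single divmod and an interval test on the quotient.
import Mathlib
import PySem

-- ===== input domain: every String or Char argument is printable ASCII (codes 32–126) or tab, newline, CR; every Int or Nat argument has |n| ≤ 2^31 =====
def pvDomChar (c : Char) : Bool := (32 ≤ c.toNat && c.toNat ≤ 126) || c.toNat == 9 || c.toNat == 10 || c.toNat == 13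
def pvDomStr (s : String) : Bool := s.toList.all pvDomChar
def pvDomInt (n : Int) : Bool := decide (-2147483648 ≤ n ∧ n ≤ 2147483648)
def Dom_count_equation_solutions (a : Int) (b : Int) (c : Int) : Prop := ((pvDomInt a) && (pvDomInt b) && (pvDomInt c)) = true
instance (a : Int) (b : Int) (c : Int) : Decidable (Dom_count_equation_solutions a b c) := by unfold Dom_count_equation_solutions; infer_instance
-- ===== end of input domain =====

-- B replaces A's scan of the constant range [a, 117] by one divmod and an interval test (simpler, single arithmetic step).

-- ===== PORT A =====
def count_equation_solutions (a : Int) (b : Int) (c : Int) : Int :=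
  -- min_digit_sum = a; max_digit_sum = 9 * len(str(10**12)) = 9 * 13 = 117
  let min_digit_sum := a
  let max_digit_sum : Int := 9 * 13
  (PySem.List.pyRange min_digit_sum (max_digit_sum + 1) 1).foldl
    (fun count digit_sum_z =>
      if PySem.Int.mod (2 - c) b = 0 ∧ PySem.Int.floordiv (2 - c) b = digit_sum_z
      then count + 1 else count) 0

-- ===== PORT B =====
def count_equation_solutions_alt (a : Int) (b : Int) (c : Int) : Int :=
  let max_digit_sum : Int := 9 * 13
  if a > max_digit_sum then 0
  else
    let q := PySem.Int.floordiv (2 - c) b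
    let r := PySem.Int.mod (2 - c) b
    if r = 0 ∧ a ≤ q ∧ q ≤ max_digit_sum then 1 else 0

-- ===== PRECONDITION & SPEC =====
-- Pre_ excludes exactly the inputs where Python A raises ZeroDivisionError: b = 0 with a non-empty range (a ≤ 117).
def Pre_count_equation_solutions (a : Int) (b : Int) (c : Int) : Prop := b ≠ 0 ∨ 117 < a
instance (a : Int) (b : Int) (c : Int) : Decidable (Pre_count_equation_solutions a b c) := by unfold Pre_count_equation_solutions; infer_instance
def pvWitness_count_equation_solutions : Int × Int × Int := (1, 1, 1)
def Spec_count_equation_solutions (a : Int) (b : Int) (c : Int) (out : Int) : Prop := out = count_equation_solutions_alt a b c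
instance (a : Int) (b : Int) (c : Int) (out : Int) : Decidable (Spec_count_equation_solutions a b c out) := by unfold Spec_count_equation_solutions; infer_instance

-- ===== CLAIM (what is proved, stated in full; the proofs are below) =====
def Claim_equal_count_equation_solutions : Prop := ∀ (a : Int) (b : Int) (c : Int), Dom_count_equation_solutions a b c → Pre_count_equation_solutions a b c → Spec_count_equation_solutions a b c (count_equation_solutions a b c)

-- ===== LEMMAS AND PROOFS =====

-- A's loop counts how many z in [lo, hi) satisfy p ∧ q = z: that is 1 iff p and q lies in the interval.
theorem pv_loop_count (p : Prop) [Decidable p] (q : Int) :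
    ∀ (n : Nat) (lo hi acc : Int), (hi - lo).toNat = n →
      (PySem.List.pyRange lo hi 1).foldl
        (fun count z => if p ∧ q = z then count + 1 else count) acc
      = acc + (if p ∧ lo ≤ q ∧ q < hi then 1 else 0) := by
  intro n
  induction n with
  | zero =>
    intro lo hi acc h
    rw [PySem.List.pyRange_one_eq_nil (by omega)]
    simp only [List.foldl_nil]
    split_ifs with h' <;> omega
  | succ k ih =>
    intro lo hi acc h
    rw [PySem.List.pyRange_one_cons (by omega)]
    simp only [List.foldl_cons]
    rw [ih (lo + 1) hi _ (by omega)]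
    by_cases hp : p
    · by_cases hq : q = lo
      · subst hq
        simp only [hp, and_true, true_and]
        split_ifs <;> omega
      · simp only [hp, true_and, if_neg hq]
        split_ifs <;> omega
    · simp only [hp, false_and, if_false]

-- ===== VERDICT (by name: the statement is the Claim_ definition above) =====
theorem count_equation_solutions_spec : Claim_equal_count_equation_solutions := by
  intro a b c _ _
  show count_equation_solutions a b c = count_equation_solutions_alt a b c
  simp only [count_equation_solutions, count_equation_solutions_alt]
  rw [pv_loop_count _ _ ((9 * 13 + 1 - a).toNat) a (9 * 13 + 1) 0 rfl]
  split_ifs <;> omega
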